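-- pv_equiv track=rewrite | github.com/EitanKalman/AnalysisOfVigenereCryptanalysis-6CCS3PRJ | Shifted_Text_Coincidence.py | run_shifted_text_attack
-- ===== SOURCE A (Python) =====
-- from math import gcd
-- from functools import reduce
--
-- def _add_left_padding(text, num):
--     return " "*num + text
--
-- def _compare(text1, text2):
--     coincidence = 0
--     # for i in range(len(text1)):
--     #     char1 = text1[i]
--     #     char2 = text2[i]
--     for char1, char2 in zip(text1, text2):
--         if char1 == char2:
--             coincidence+=1
--     return coincidence
--
-- def run_shifted_text_attack(ciphertext):
--     texts = []
--     # Created shifted versions of the ciphertext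
--     for i in range(3, 21):
--         text = _add_left_padding(ciphertext, i)
--         texts.append(text)
--     coincidences = []
--     # Get the number of coincidences for each shifted version
--     for i in texts:
--         coincidence = _compare(ciphertext, i)
--         coincidences.append(coincidence)
--     # Filter out those shifts with the highest number of coincidences
--     possible_key_lengths = []
--     for idx, coincidence in enumerate(coincidences):
--         if coincidence>(len(ciphertext)/20):
--             possible_key_lengths.append(idx+3)
--     return reduce(gcd, possible_key_lengths)
-- ===== SOURCE B (Python) =====
-- from math import gcd
--
-- def run_shifted_text_attack(ciphertext):
--     n = len(ciphertext)
--     # index: character -> ascending list of its positions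
--     positions = {}
--     for j, ch in enumerate(ciphertext):
--         positions.setdefault(ch, []).append(j)
--     # histogram of pair distances 3..20 among equal characters; positions are
--     # strictly increasing ints, so only the next 20 positions can be within 20
--     counts = [0] * 21
--     for pos in positions.values():
--         for a, p in enumerate(pos):
--             for q in pos[a + 1:a + 21]:
--                 if q - p > 20:
--                     break
--                 if q - p >= 3:
--                     counts[q - p] += 1
--     spaces = positions.get(' ', [])
--     g = 0
--     for i in range(3, 21):
--         c = counts[i] + sum(1 for p in spaces if p < i)
--         if 20 * c > n:
--             g = gcd(g, i)
--     return g
-- ===== Notes on version B (the rewrite author's own statement) =====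
-- stated objective: alternative
-- what changed: Instead of building 18 space-padded copies and comparing each against the ciphertext position by position, B builds a character-to-positions index in one pass and histograms the distances (3..20) between positions of equal characters, adds a prefix-space correction for the padding, then thresholds and folds gcd from 0; where A's reduce(gcd, []) raises TypeError (no passing shift) B naturally returns 0, and Pre_ excludes those inputs.
import Mathlib
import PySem

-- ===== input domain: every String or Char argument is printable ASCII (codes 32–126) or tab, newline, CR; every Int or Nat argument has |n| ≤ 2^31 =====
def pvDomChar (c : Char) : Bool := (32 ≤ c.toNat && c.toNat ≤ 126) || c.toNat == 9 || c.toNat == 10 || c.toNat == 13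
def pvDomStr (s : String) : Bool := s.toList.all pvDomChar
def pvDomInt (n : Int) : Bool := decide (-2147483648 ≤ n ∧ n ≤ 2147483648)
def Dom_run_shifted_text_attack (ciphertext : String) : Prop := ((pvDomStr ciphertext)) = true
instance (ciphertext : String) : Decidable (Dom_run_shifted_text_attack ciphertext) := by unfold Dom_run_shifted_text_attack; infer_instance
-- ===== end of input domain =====

-- B replaces A's 18 padded copies compared position by position with a character→positions
-- index whose equal-character pair DISTANCES (3..20) are histogrammed, plus a prefix-space
-- correction for the padding, then threshold and gcd; objective: alternative. Where A's
-- reduce(gcd, []) raises TypeError (no shift passes the threshold, e.g. the empty string),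
-- B returns 0, the gcd identity; Pre_ excludes exactly those inputs.

-- ===== PORT A =====
-- " "*num + text  (num here is always 3..20; pyRepeat [' '] num is num spaces)
def pv_add_left_padding (text : List Char) (num : Int) : List Char :=
  PySem.List.pyRepeat [' '] num ++ text

def pv_compare (t1 t2 : List Char) : Int :=
  (t1.zip t2).foldl (fun c p => if p.1 = p.2 then c + 1 else c) 0

def run_shifted_text_attack (ciphertext : String) : Int :=
  let s := ciphertext.toList
  let texts := (PySem.List.pyRange 3 21 1).foldl (fun acc i => acc ++ [pv_add_left_padding s i]) []
  let coincidences := texts.foldl (fun acc t => acc ++ [pv_compare s t]) []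
  -- 'coincidence > len(ciphertext)/20' ported as the integer inequality 20*coincidence > len,
  -- which is exact for every length the float quotient represents faithfully
  let possible := (PySem.List.enumerate coincidences 0).foldl
      (fun acc p => if 20 * p.2 > (s.length : Int) then acc ++ [p.1 + 3] else acc) []
  match possible with
  | [] => 0   -- Python's reduce(gcd, []) raises TypeError here; excluded by Pre_
  | h :: t => t.foldl (fun a b => (Int.gcd a b : Int)) h

-- ===== PORT B =====
-- inner loop 'for q in pos[a+1:a+21]: if q-p>20: break; if q-p>=3: counts[q-p] += 1'
def pvInnerB (p : Int) (rest : List Int) (counts : List Int) : List Int :=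
  match rest with
  | [] => counts
  | q :: t =>
    if q - p > 20 then counts
    else pvInnerB p t
      (if q - p ≥ 3 then
        PySem.List.pySetD counts (q - p) (PySem.List.pyGetD counts (q - p) 0 + 1)
       else counts)

def run_shifted_text_attack_alt (ciphertext : String) : Int :=
  let s := ciphertext.toList
  let n : Int := (s.length : Int)
  -- positions = {}; for j, ch in enumerate(ciphertext): positions.setdefault(ch, []).append(j)
  let positions : PySem.Dict Char (List Int) :=
    (PySem.List.enumerate s 0).foldl (fun d p => d.modify p.2 [] (· ++ [p.1])) PySem.Dict.empty
  -- counts = [0]*21; for pos in positions.values(): for a, p in enumerate(pos): for q in pos[a+1:] …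
  let counts : List Int := positions.values.foldl
      (fun counts pos =>
        (PySem.List.enumerate pos 0).foldl
          (fun counts ap => pvInnerB ap.2 (PySem.List.slice pos (some (ap.1 + 1)) (some (ap.1 + 21))) counts)
          counts)
      (List.replicate 21 (0 : Int))
  let spaces := positions.getD ' ' []
  -- g = 0; for i in range(3, 21): c = counts[i] + sum(1 for p in spaces if p < i); …
  (PySem.List.pyRange 3 21 1).foldl
    (fun g i =>
      let c := PySem.List.pyGetD counts i 0 +
               spaces.foldl (fun t p => if p < i then t + 1 else t) (0 : Int)
      if 20 * c > n then (Int.gcd g i : Int) else g) 0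

-- ===== PRECONDITION & SPEC =====
-- coincidence count of the text against itself shifted right by i (positions before i face a space)
def pvCoinc (s : List Char) (i : Nat) : Nat :=
  (List.range s.length).countP
    (fun j => s.getD j ' ' = (if j < i then ' ' else s.getD (j - i) ' '))

-- Pre_ excludes exactly the inputs where no shift in 3..20 passes the threshold 20*coinc > len:
-- there Python's reduce(gcd, []) raises TypeError, so A returns no value.
def Pre_run_shifted_text_attack (ciphertext : String) : Prop :=
  ∃ i < 21, 3 ≤ i ∧ 20 * pvCoinc ciphertext.toList i > ciphertext.toList.length
instance (ciphertext : String) : Decidable (Pre_run_shifted_text_attack ciphertext) := by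
  unfold Pre_run_shifted_text_attack; infer_instance

def pvWitness_run_shifted_text_attack : String := "aaaa"

def Spec_run_shifted_text_attack (ciphertext : String) (out : Int) : Prop :=
  out = run_shifted_text_attack_alt ciphertext
instance (ciphertext : String) (out : Int) : Decidable (Spec_run_shifted_text_attack ciphertext out) := by
  unfold Spec_run_shifted_text_attack; infer_instance

-- ===== CLAIM (what is proved, stated in full; the proofs are below) =====
def Claim_equal_run_shifted_text_attack : Prop := ∀ (ciphertext : String), Dom_run_shifted_text_attack ciphertext → Pre_run_shifted_text_attack ciphertext → Spec_run_shifted_text_attack ciphertext (run_shifted_text_attack ciphertext)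


-- ===== LEMMAS AND PROOFS =====

-- proof-side helper definitions
def pvPosL (s : List Char) (c : Char) : List Int :=
  ((List.range s.length).filter (fun j => s.getD j ' ' = c)).map (fun j : Nat => (j : Int))

def pvPairsB : List Int → List Int → List Int
  | [], c => c
  | p :: t, c => pvPairsB t (pvInnerB p t c)

def pvNP (i : Nat) : List Int → Nat
  | [] => 0
  | p :: t => t.countP (fun q => q - p = (i : Int)) + pvNP i t

-- ---- A-side reduction (A's four staged passes reduce to one filter + gcd fold) ----

lemma countP_indices {α : Type} (l : List α) (d : α) (p : α → Bool) :
    l.countP p = (List.range l.length).countP (fun j => p (l.getD j d)) := by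
  induction l with
  | nil => simp
  | cons a t ih =>
    simp [List.range_succ_eq_map, List.countP_cons, List.countP_map, Function.comp_def, ih]

lemma compare_eq (s : List Char) (i : Nat) :
    pv_compare s (List.replicate i ' ' ++ s) = (pvCoinc s i : Int) := by
  unfold pv_compare pvCoinc
  rw [PySem.List.foldl_ite_add_one]
  rw [countP_indices (d := ((' ' : Char), (' ' : Char)))]
  have hlen : (s.zip (List.replicate i ' ' ++ s)).length = s.length := by
    simp [List.length_zip]
  rw [hlen]
  norm_num
  apply List.countP_congr
  intro j hj
  have hjn : j < s.length := List.mem_range.mp hj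
  have hj2 : j < (s.zip (List.replicate i ' ' ++ s)).length := by rw [hlen]; exact hjn
  rw [List.getElem?_eq_getElem hj2, List.getElem?_eq_getElem hjn]
  simp only [Option.getD_some, List.getElem_zip]
  by_cases hji : j < i
  · have h1 : (List.replicate i ' ' ++ s)[j]'(by simp; omega) = ' ' := by
      rw [List.getElem_append_left (by simpa using hji)]; simp
    simp [h1, hji]
  · have h1 : (List.replicate i ' ' ++ s)[j]'(by simp; omega) = s[j - i]'(by omega) := by
      rw [List.getElem_append_right (by simpa using hji)]; simp
    have h2 : s[j-i]? = some (s[j-i]'(by omega)) := List.getElem?_eq_getElem (by omega)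
    simp [h1, h2, hji]

lemma enum_fold (g : Nat → Int) (P : Int → Prop) [DecidablePred P] :
    ∀ (m e : Nat) (acc : List Int),
      (PySem.List.enumerate ((List.range' (e + 3) m).map g) (e : Int)).foldl
          (fun a p => if P p.2 then a ++ [p.1 + 3] else a) acc
        = acc ++ ((List.range' (e + 3) m).filter (fun k => decide (P (g k)))).map (fun (k : Nat) => (k : Int)) := by
  intro m
  induction m with
  | zero => intro e acc; simp [PySem.List.enumerate_nil]
  | succ m ih =>
    intro e acc
    rw [List.range'_succ]
    simp only [List.map_cons, PySem.List.enumerate_cons, List.foldl_cons, List.filter_cons]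
    have he : ((e : Int) + 1) = ((e + 1 : Nat) : Int) := by push_cast; ring
    have hr : e + 3 + 1 = (e + 1) + 3 := by omega
    by_cases h : P (g (e + 3))
    · rw [if_pos h, he, hr, ih (e+1) (acc ++ [(e:Int) + 3])]
      simp [h]
    · rw [if_neg h, he, hr, ih (e+1) acc]
      simp [h]

lemma cond_fold {β : Type} (C : Nat → Prop) [DecidablePred C] (step : β → Nat → β) :
    ∀ (l : List Nat) (acc : β),
      l.foldl (fun g i => if C i then step g i else g) acc
        = (l.filter (fun i => decide (C i))).foldl step acc := by
  intro l
  induction l with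
  | nil => intro acc; rfl
  | cons a t ih =>
    intro acc
    rw [List.foldl_cons, List.filter_cons]
    by_cases h : C a
    · rw [if_pos h, if_pos (decide_eq_true h), List.foldl_cons]; exact ih _
    · rw [if_neg h, if_neg (fun hc => h (of_decide_eq_true hc))]; exact ih acc

lemma pyRange_lit : PySem.List.pyRange 3 21 1 = (List.range' 3 18).map (fun k : Nat => (k : Int)) := by
  decide

-- A reduced to a gcd fold over the passing shifts
lemma A_reduced (ciphertext : String)
    (hp : ∃ i < 21, 3 ≤ i ∧ 20 * pvCoinc ciphertext.toList i > ciphertext.toList.length) :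
    ∃ k t, (List.range' 3 18).filter
        (fun i => decide (20 * pvCoinc ciphertext.toList i > ciphertext.toList.length)) = k :: t ∧
      run_shifted_text_attack ciphertext = t.foldl (fun a (b : Nat) => (Int.gcd a (b : Int) : Int)) (k : Int) := by
  unfold run_shifted_text_attack
  dsimp only
  set s := ciphertext.toList with hs
  rw [pyRange_lit, PySem.List.foldl_append_singleton_eq_map,
      PySem.List.foldl_append_singleton_eq_map]
  simp only [List.nil_append, List.map_map]
  have hfun : pv_compare s ∘ pv_add_left_padding s ∘ (fun k : Nat => (k : Int))
      = fun k : Nat => (pvCoinc s k : Int) := by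
    funext k
    simp only [Function.comp_apply, pv_add_left_padding, PySem.List.pyRepeat_singleton]
    rw [Int.toNat_natCast k, compare_eq]
  rw [hfun]
  have h18 : (List.range' 3 18) = (List.range' (0 + 3) 18) := by norm_num
  rw [h18]
  rw [show ((0 : Int)) = ((0 : Nat) : Int) by norm_num]
  rw [enum_fold (fun k => (pvCoinc s k : Int)) (fun c => 20 * c > (s.length : Int)) 18 0 []]
  have hfilt : (List.range' (0 + 3) 18).filter
        (fun k => decide (20 * (pvCoinc s k : Int) > (s.length : Int)))
      = (List.range' (0 + 3) 18).filter (fun i => decide (20 * pvCoinc s i > s.length)) := by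
    apply List.filter_congr
    intro i _
    rw [decide_eq_decide]
    exact_mod_cast Iff.rfl
  rw [hfilt]
  set keys := (List.range' (0+3) 18).filter (fun i => decide (20 * pvCoinc s i > s.length)) with hk
  cases hkk : keys with
  | nil =>
    exfalso
    obtain ⟨i, hlt, h3, hgt⟩ := hp
    have : i ∈ keys := by
      rw [hk, List.mem_filter, List.mem_range'_1]
      exact ⟨⟨by omega, by omega⟩, by simpa using hgt⟩
    rw [hkk] at this; exact absurd this (List.not_mem_nil)
  | cons k t =>
    refine ⟨k, t, rfl, ?_⟩
    simp only [List.nil_append, List.map_cons]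
    rw [List.foldl_map]

-- ---- B-side: positions dictionary, histogram loops, and counting ----

lemma posL_pairwise (s : List Char) (c : Char) : (pvPosL s c).Pairwise (· < ·) := by
  rw [pvPosL]
  refine List.pairwise_map.mpr ?_
  refine List.Pairwise.imp ?_ (List.Pairwise.filter _ (List.pairwise_lt_range))
  intro a b h; exact_mod_cast h

lemma mem_posL (s : List Char) (c : Char) (x : Int) :
    x ∈ pvPosL s c ↔ ∃ j : Nat, j < s.length ∧ s.getD j ' ' = c ∧ x = (j : Int) := by
  rw [pvPosL]
  simp only [List.mem_map, List.mem_filter, List.mem_range]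
  constructor
  · rintro ⟨j, ⟨hj, hc⟩, rfl⟩; exact ⟨j, hj, by simpa using hc, rfl⟩
  · rintro ⟨j, hj, hc, rfl⟩; exact ⟨j, ⟨hj, by simpa using hc⟩, rfl⟩

lemma enumFilter (c : Char) : ∀ (l : List Char) (k : Nat),
    ((((PySem.List.enumerate l (k : Int)).map Prod.swap).filter (fun p => p.1 == c)).map (·.2))
      = ((List.range l.length).filter (fun j => l.getD j ' ' = c)).map (fun j : Nat => ((k + j : Nat) : Int)) := by
  intro l
  induction l with
  | nil => intro k; simp [PySem.List.enumerate_nil]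
  | cons a t ih =>
    intro k
    rw [PySem.List.enumerate_cons]
    have hk : (k : Int) + 1 = ((k + 1 : Nat) : Int) := by push_cast; ring
    rw [hk]
    have ht := ih (k + 1)
    rw [List.filter_map] at ht
    simp only [List.map_cons, Prod.swap_prod_mk, List.filter_cons, List.length_cons,
      List.range_succ_eq_map, List.filter_map, List.map_map]
    have htail :
        List.map ((fun x : Char × Int => x.2) ∘ Prod.swap)
            (List.filter ((fun p : Char × Int => p.1 == c) ∘ Prod.swap) (PySem.List.enumerate t ((k+1 : Nat) : Int)))
          = List.map ((fun j : Nat => ((k + j : Nat) : Int)) ∘ Nat.succ)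
              (List.filter ((fun j => decide ((a :: t).getD j ' ' = c)) ∘ Nat.succ) (List.range t.length)) := by
      rw [List.map_map] at ht
      rw [ht]
      have hp : ((fun j => decide ((a :: t).getD j ' ' = c)) ∘ Nat.succ)
          = (fun j => decide (t.getD j ' ' = c)) := by
        funext j; simp [List.getD_cons_succ]
      rw [hp]
      apply List.map_congr_left
      intro j _
      simp only [Function.comp_apply]
      congr 1
      omega
    by_cases h : a = c
    · subst h
      have hd : decide ((a :: t).getD 0 ' ' = a) = true := by simp [List.getD_cons_zero]
      simp only [beq_self_eq_true, if_true, hd, List.map_cons, List.map_map]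
      rw [htail]
      simp
    · have hb : (a == c) = false := beq_eq_false_iff_ne.mpr h
      have hd : decide ((a :: t).getD 0 ' ' = c) = false := by simp [List.getD_cons_zero, h]
      simp only [hb, Bool.false_eq_true, if_false, hd, List.map_map]
      rw [htail]

lemma dict_getD (s : List Char) (c : Char) :
    ((PySem.List.enumerate s 0).foldl (fun d p => d.modify p.2 [] (· ++ [p.1]))
      (PySem.Dict.empty : PySem.Dict Char (List Int))).getD c [] = pvPosL s c := by
  have h1 : (PySem.List.enumerate s 0).foldl (fun d p => d.modify p.2 [] (· ++ [p.1]))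
      (PySem.Dict.empty : PySem.Dict Char (List Int))
      = ((PySem.List.enumerate s 0).map Prod.swap).foldl
          (fun d p => d.modify p.1 [] (· ++ [p.2])) PySem.Dict.empty := by
    rw [List.foldl_map]
    rfl
  rw [h1, PySem.Dict.getD_foldl_modify_append]
  rw [show ((0:Int)) = ((0:Nat):Int) from rfl]
  rw [enumFilter c s 0]
  simp [pvPosL]

lemma dict_values (s : List Char) :
    ((PySem.List.enumerate s 0).foldl (fun d p => d.modify p.2 [] (· ++ [p.1]))
      (PySem.Dict.empty : PySem.Dict Char (List Int))).values
      = (PySem.List.dedup s).map (pvPosL s) := by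
  have hnd : ((PySem.List.enumerate s 0).foldl (fun d p => d.modify p.2 [] (· ++ [p.1]))
      (PySem.Dict.empty : PySem.Dict Char (List Int))).keys.Nodup := by
    apply PySem.Dict.nodup_keys_foldl_modify_key
    exact PySem.Dict.nodup_keys_empty
  have hkeys : ((PySem.List.enumerate s 0).foldl (fun d p => d.modify p.2 [] (· ++ [p.1]))
      (PySem.Dict.empty : PySem.Dict Char (List Int))).keys = PySem.List.dedup s := by
    rw [PySem.Dict.keys_foldl_modify_key]
    rw [PySem.List.map_snd_enumerate]
    simp only [PySem.Dict.keys_empty]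
    rfl
  rw [PySem.Dict.values_eq_map_keys _ hnd [], hkeys]
  apply List.map_congr_left
  intro c _
  exact dict_getD s c

lemma length_innerB (p : Int) (t : List Int) : ∀ c, (pvInnerB p t c).length = c.length := by
  induction t with
  | nil => intro c; rfl
  | cons q t ih =>
    intro c
    unfold pvInnerB
    split
    · rfl
    · rw [ih]
      split
      · exact PySem.List.length_pySetD _ _ _
      · rfl

lemma length_pairsB (pos : List Int) : ∀ c, (pvPairsB pos c).length = c.length := by
  induction pos with
  | nil => intro c; rfl
  | cons p t ih => intro c; rw [pvPairsB, ih, length_innerB]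

lemma innerB_getD (p : Int) (t : List Int) (i : Nat) (h3 : 3 ≤ i) (h20 : i ≤ 20) :
    ∀ c : List Int, c.length = 21 → t.Pairwise (· ≤ ·) →
    PySem.List.pyGetD (pvInnerB p t c) (i : Int) 0
      = PySem.List.pyGetD c (i : Int) 0 + (t.countP (fun q => q - p = (i : Int)) : Int) := by
  induction t with
  | nil => intro c _ _; simp [pvInnerB]
  | cons q t ih =>
    intro c hlen hs
    rw [List.pairwise_cons] at hs
    rw [List.countP_cons]
    unfold pvInnerB
    by_cases hbr : q - p > 20
    · rw [if_pos hbr]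
      have h0 : (q - p = (i : Int)) = False := by
        simp only [eq_iff_iff, iff_false]; intro h; omega
      have hrest : t.countP (fun q => q - p = (i : Int)) = 0 := by
        rw [List.countP_eq_zero]
        intro x hx
        have := hs.1 x hx
        simp only [decide_eq_true_eq]
        omega
      simp [hrest, h0]
    · rw [if_neg hbr]
      push_neg at hbr
      by_cases hd : q - p ≥ 3
      · rw [if_pos hd]
        have hlen2 : (PySem.List.pySetD c (q - p) (PySem.List.pyGetD c (q - p) 0 + 1)).length = 21 := by
          rw [PySem.List.length_pySetD]; exact hlen
        rw [ih _ hlen2 hs.2]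
        have hset : PySem.List.pyGetD (PySem.List.pySetD c (q - p) (PySem.List.pyGetD c (q - p) 0 + 1)) (i : Int) 0
            = PySem.List.pyGetD c (i : Int) 0 + (if q - p = (i : Int) then 1 else 0) := by
          have hq : q - p = (((q - p).toNat : Nat) : Int) := by omega
          rw [hq, PySem.List.pyGetD_pySetD_natCast c ((q - p).toNat) i _ 0 (by omega)]
          by_cases he : ((q - p).toNat : Int) = (i : Int)
          · have hi : i = (q - p).toNat := by omega
            rw [if_pos he, if_pos hi, ← hi]
          · have hi : ¬ (i = (q - p).toNat) := by omega
            rw [if_neg he, if_neg hi]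
            simp
        rw [hset]
        by_cases he : q - p = (i : Int) <;> simp [he] <;> push_cast <;> ring
      · rw [if_neg hd]
        rw [ih _ hlen hs.2]
        have he : (q - p = (i : Int)) = False := by
          simp only [eq_iff_iff, iff_false]; intro h; omega
        simp [he]

lemma pairsB_getD (i : Nat) (h3 : 3 ≤ i) (h20 : i ≤ 20) :
    ∀ (pos : List Int), pos.Pairwise (· ≤ ·) → ∀ c : List Int, c.length = 21 →
    PySem.List.pyGetD (pvPairsB pos c) (i : Int) 0
      = PySem.List.pyGetD c (i : Int) 0 + (pvNP i pos : Int) := by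
  intro pos
  induction pos with
  | nil => intro _ c _; simp [pvPairsB, pvNP]
  | cons p t ih =>
    intro hs c hlen
    rw [List.pairwise_cons] at hs
    rw [pvPairsB, pvNP]
    rw [ih hs.2 _ (by rw [length_innerB]; exact hlen)]
    rw [innerB_getD p t i h3 h20 c hlen hs.2]
    push_cast
    ring

lemma innerB_take (p : Int) :
    ∀ (m : Nat) (t : List Int) (c : List Int), t.Pairwise (· < ·) →
      (∀ x ∈ t, p + 21 - (m : Int) ≤ x) →
      pvInnerB p (t.take m) c = pvInnerB p t c := by
  intro m
  induction m with
  | zero =>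
    intro t c _ hb
    cases t with
    | nil => rfl
    | cons q t' =>
      have hq := hb q List.mem_cons_self
      rw [List.take_zero]
      show c = pvInnerB p (q :: t') c
      unfold pvInnerB
      rw [if_pos (by omega : q - p > 20)]
  | succ m ih =>
    intro t c hs hb
    cases t with
    | nil => rfl
    | cons q t' =>
      rw [List.pairwise_cons] at hs
      have hq := hb q List.mem_cons_self
      rw [List.take_succ_cons]
      show pvInnerB p (q :: t'.take m) c = pvInnerB p (q :: t') c
      unfold pvInnerB
      by_cases hbr : q - p > 20
      · rw [if_pos hbr, if_pos hbr]
      · rw [if_neg hbr, if_neg hbr]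
        apply ih t' _ hs.2
        intro x hx
        have hqx := hs.1 x hx
        have : ((m + 1 : Nat) : Int) = (m : Int) + 1 := by push_cast; ring
        omega

lemma mid_eq : ∀ (pos pre c : List Int), pos.Pairwise (· < ·) →
    (PySem.List.enumerate pos (pre.length : Int)).foldl
      (fun c ap => pvInnerB ap.2 (PySem.List.slice (pre ++ pos) (some (ap.1 + 1)) (some (ap.1 + 21))) c) c
    = pvPairsB pos c := by
  intro pos
  induction pos with
  | nil => intro pre c _; simp [PySem.List.enumerate_nil, pvPairsB]
  | cons p t ih =>
    intro pre c hs
    rw [List.pairwise_cons] at hs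
    rw [PySem.List.enumerate_cons, List.foldl_cons]
    have hsl : PySem.List.slice (pre ++ p :: t) (some ((pre.length : Int) + 1))
        (some ((pre.length : Int) + 21)) = t.take 20 := by
      rw [show ((pre.length : Int) + 1) = (((pre.length + 1 : Nat)) : Int) by push_cast; ring]
      rw [show ((pre.length : Int) + 21) = (((pre.length + 1 : Nat)) : Int) + ((20 : Nat) : Int) by
        push_cast; ring]
      rw [PySem.List.slice_natCast_add]
      rw [show pre ++ p :: t = (pre ++ [p]) ++ t by simp]
      rw [show pre.length + 1 = (pre ++ [p]).length by simp]
      rw [List.drop_left]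
    rw [hsl]
    rw [innerB_take p 20 t c hs.2 (by intro x hx; have := hs.1 x hx; omega)]
    have hst : (pre.length : Int) + 1 = (((pre ++ [p]).length : Nat) : Int) := by
      simp
    rw [hst]
    have := ih (pre ++ [p]) (pvInnerB p t c) hs.2
    rw [show (pre ++ [p]) ++ t = pre ++ p :: t by simp] at this
    rw [this, pvPairsB]

lemma outer_getD (i : Nat) (h3 : 3 ≤ i) (h20 : i ≤ 20) :
    ∀ (L : List (List Int)), (∀ pos ∈ L, pos.Pairwise (· ≤ ·)) →
      ∀ c : List Int, c.length = 21 →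
    PySem.List.pyGetD (L.foldl (fun c pos => pvPairsB pos c) c) (i : Int) 0
      = PySem.List.pyGetD c (i : Int) 0 + ((L.map (pvNP i)).sum : Int) := by
  intro L
  induction L with
  | nil => intro _ c _; simp
  | cons pos L ih =>
    intro hL c hlen
    rw [List.foldl_cons, List.map_cons, List.sum_cons]
    rw [ih (fun x hx => hL x (List.mem_cons_of_mem _ hx)) _ (by rw [length_pairsB]; exact hlen)]
    rw [pairsB_getD i h3 h20 pos (hL pos List.mem_cons_self) c hlen]
    push_cast
    ring

lemma np_eq_countP (i : Nat) (h1 : 1 ≤ i) :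
    ∀ (pos : List Int), pos.Pairwise (· < ·) →
      pvNP i pos = pos.countP (fun p => decide (p + (i : Int) ∈ pos)) := by
  intro pos
  induction pos with
  | nil => simp [pvNP]
  | cons p t ih =>
    intro hs
    rw [List.pairwise_cons] at hs
    have hnd : t.Nodup := List.Pairwise.imp (fun h => ne_of_lt h) hs.2
    rw [pvNP, ih hs.2, List.countP_cons]
    have h1' : t.countP (fun q => q - p = (i : Int)) = if p + (i : Int) ∈ p :: t then 1 else 0 := by
      have : (fun q : Int => decide (q - p = (i : Int))) = (fun q : Int => q == p + (i : Int)) := by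
        funext q
        by_cases h : q - p = (i : Int)
        · simp [h]; omega
        · simp only [h, decide_false]
          symm
          simp only [beq_eq_false_iff_ne, ne_eq]
          omega
      rw [this, ← List.count, List.Nodup.count hnd]
      have hm : p + (i : Int) ∈ p :: t ↔ p + (i : Int) ∈ t := by
        simp only [List.mem_cons, or_iff_right_iff_imp]
        intro h
        exfalso; omega
      simp [hm]
    have h2' : t.countP (fun q => decide (q + (i : Int) ∈ p :: t))
        = t.countP (fun q => decide (q + (i : Int) ∈ t)) := by
      apply List.countP_congr
      intro q hq
      have hpq : p < q := hs.1 q hq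
      simp only [decide_eq_true_eq, List.mem_cons, or_iff_right_iff_imp]
      intro h; exfalso; omega
    rw [h1', h2']
    by_cases hmem : p + (i : Int) ∈ p :: t <;> simp [hmem] <;> omega

lemma countP_posL (s : List Char) (c : Char) (i : Nat) :
    (pvPosL s c).countP (fun p => decide (p + (i : Int) ∈ pvPosL s c))
      = (List.range s.length).countP
          (fun j => decide (j + i < s.length ∧ s.getD j ' ' = s.getD (j + i) ' ') && decide (s.getD j ' ' = c)) := by
  have hpred : (fun p : Int => decide (p + (i : Int) ∈ pvPosL s c))
      = (fun p : Int => decide (∃ j' : Nat, j' < s.length ∧ s.getD j' ' ' = c ∧ p + (i : Int) = (j' : Int))) := by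
    funext p
    simp only [decide_eq_decide]
    exact mem_posL s c (p + (i : Int))
  rw [hpred, pvPosL, List.countP_map, List.countP_filter]
  apply List.countP_congr
  intro j hj
  have hjn : j < s.length := List.mem_range.mp hj
  simp only [Function.comp_apply, Bool.and_eq_true, decide_eq_true_eq]
  constructor
  · rintro ⟨⟨j', hj', hc', he⟩, hc⟩
    have : j' = j + i := by omega
    subst this
    exact ⟨⟨hj', by rw [hc, hc']⟩, hc⟩
  · rintro ⟨⟨hlt, he⟩, hc⟩
    exact ⟨⟨j + i, hlt, by rw [← he, hc], by push_cast; ring⟩, hc⟩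

lemma partition_one {α κ : Type} [DecidableEq κ] (key : α → κ) (base : α → Bool) (x : α) :
    ∀ L : List κ, L.Nodup → key x ∈ L →
      (L.map (fun c => if base x && decide (key x = c) then 1 else 0)).sum
        = if base x then 1 else 0 := by
  intro L
  induction L with
  | nil => intro _ h; exact absurd h (List.not_mem_nil)
  | cons a L ih =>
    intro hnd hm
    rw [List.nodup_cons] at hnd
    rw [List.map_cons, List.sum_cons]
    by_cases h : key x = a
    · have hz : ∀ c ∈ L, (if base x && decide (key x = c) then 1 else 0) = 0 := by
        intro c hc
        have : key x ≠ c := by rintro rfl; exact hnd.1 (h ▸ hc)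
        simp [this]
      have : (L.map (fun c => if base x && decide (key x = c) then 1 else 0)).sum = 0 := by
        rw [List.sum_eq_zero]
        intro y hy
        obtain ⟨c, hc, rfl⟩ := List.mem_map.mp hy
        exact hz c hc
      rw [this, h]
      by_cases hb : base x <;> simp [hb]
    · have hm' : key x ∈ L := by
        rcases List.mem_cons.mp hm with h' | h'
        · exact absurd h' h
        · exact h'
      rw [ih hnd.2 hm']
      simp [h]

lemma partition_countP {α κ : Type} [DecidableEq κ] (key : α → κ) (base : α → Bool)
    (L : List κ) (hnd : L.Nodup) :
    ∀ (xs : List α), (∀ x ∈ xs, key x ∈ L) →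
      (L.map (fun c => xs.countP (fun x => base x && decide (key x = c)))).sum = xs.countP base := by
  intro xs
  induction xs with
  | nil => intro _; simp
  | cons x xs ih =>
    intro hx
    have hsum : ∀ c, (x :: xs).countP (fun y => base y && decide (key y = c))
        = xs.countP (fun y => base y && decide (key y = c)) + (if base x && decide (key x = c) then 1 else 0) := by
      intro c
      rw [List.countP_cons]
    have : (L.map (fun c => (x :: xs).countP (fun y => base y && decide (key y = c)))).sum
        = (L.map (fun c => xs.countP (fun y => base y && decide (key y = c)))).sum
          + (L.map (fun c => if base x && decide (key x = c) then 1 else 0)).sum := by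
      simp only [hsum]
      exact List.sum_map_add
    rw [this, ih (fun y hy => hx y (List.mem_cons_of_mem _ hy)),
      partition_one key base x L hnd (hx x List.mem_cons_self), List.countP_cons]

lemma countP_split {α : Type} (l : List α) (p q : α → Bool) :
    l.countP p = l.countP (fun a => q a && p a) + l.countP (fun a => !q a && p a) := by
  induction l with
  | nil => simp
  | cons a t ih =>
    simp only [List.countP_cons, ih]
    by_cases h : q a <;> by_cases h2 : p a <;> simp [h, h2] <;> omega

lemma reindex (s : List Char) (i : Nat) :
    (List.range s.length).countP
        (fun j => !decide (j < i) && decide (s.getD j ' ' = s.getD (j - i) ' '))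
      = (List.range s.length).countP
          (fun j => decide (j + i < s.length ∧ s.getD j ' ' = s.getD (j + i) ' ')) := by
  set n := s.length with hn
  by_cases hin : i ≤ n
  · have hL : List.range n = List.range i ++ (List.range (n - i)).map (fun x => i + x) := by
      rw [← List.range_add]
      congr 1
      omega
    have hR : List.range n = List.range (n - i) ++ (List.range i).map (fun x => (n - i) + x) := by
      rw [← List.range_add]
      congr 1
      omega
    conv_lhs => rw [hL]
    conv_rhs => rw [hR]
    rw [List.countP_append, List.countP_append, List.countP_map, List.countP_map]
    have z1 : (List.range i).countP
        (fun j => !decide (j < i) && decide (s.getD j ' ' = s.getD (j - i) ' ')) = 0 := by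
      rw [List.countP_eq_zero]
      intro j hj
      have := List.mem_range.mp hj
      simp [this]
    have z2 : (List.range i).countP
        ((fun j => decide (j + i < n ∧ s.getD j ' ' = s.getD (j + i) ' ')) ∘ (fun x => (n - i) + x)) = 0 := by
      rw [List.countP_eq_zero]
      intro j hj
      have := List.mem_range.mp hj
      simp only [Function.comp_apply, decide_eq_true_eq]
      rintro ⟨h, -⟩
      omega
    rw [z1, z2]
    simp only [Nat.zero_add, Nat.add_zero]
    apply List.countP_congr
    intro x hx
    have hxn := List.mem_range.mp hx
    simp only [Function.comp_apply]
    have h1 : ¬ (i + x < i) := by omega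
    have h2 : i + x - i = x := by omega
    have h3 : x + i < n := by omega
    simp only [h1, decide_false, Bool.not_false, Bool.true_and, h2, h3, true_and,
      decide_eq_true_eq]
    rw [show i + x = x + i by omega]
    exact eq_comm
  · have z1 : (List.range n).countP
        (fun j => !decide (j < i) && decide (s.getD j ' ' = s.getD (j - i) ' ')) = 0 := by
      rw [List.countP_eq_zero]
      intro j hj
      have := List.mem_range.mp hj
      have : j < i := by omega
      simp [this]
    have z2 : (List.range n).countP
        (fun j => decide (j + i < n ∧ s.getD j ' ' = s.getD (j + i) ' ')) = 0 := by
      rw [List.countP_eq_zero]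
      intro j hj
      have := List.mem_range.mp hj
      simp only [decide_eq_true_eq]
      rintro ⟨h, -⟩
      omega
    rw [z1, z2]

lemma coinc_split (s : List Char) (i : Nat) :
    pvCoinc s i
      = (List.range s.length).countP (fun j => decide (j < i) && decide (s.getD j ' ' = ' '))
        + (List.range s.length).countP
            (fun j => decide (j + i < s.length ∧ s.getD j ' ' = s.getD (j + i) ' ')) := by
  rw [pvCoinc, countP_split _ _ (fun j => decide (j < i))]
  congr 1
  · apply List.countP_congr
    intro j _
    by_cases h : j < i <;> simp [h]
  · rw [← reindex]
    apply List.countP_congr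
    intro j _
    by_cases h : j < i <;> simp [h]


-- B's per-shift count (histogram value + prefix spaces) equals A's coincidence count
lemma B_count_eq (s : List Char) (i : Nat) (h3 : 3 ≤ i) (h20 : i ≤ 20) :
    PySem.List.pyGetD
        (((PySem.List.enumerate s 0).foldl (fun d p => d.modify p.2 [] (· ++ [p.1]))
            (PySem.Dict.empty : PySem.Dict Char (List Int))).values.foldl
          (fun counts pos =>
            (PySem.List.enumerate pos 0).foldl
              (fun counts ap => pvInnerB ap.2 (PySem.List.slice pos (some (ap.1 + 1)) (some (ap.1 + 21))) counts)
              counts)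
          (List.replicate 21 (0 : Int))) (i : Int) 0
      + (pvPosL s ' ').foldl (fun t p => if p < (i : Int) then t + 1 else t) (0 : Int)
      = (pvCoinc s i : Int) := by
  set n := s.length with hn
  -- rewrite the middle loop into the tails recursion pvPairsB (member position lists are
  -- strictly increasing, so the 21-bounded slice loses nothing)
  rw [dict_values]
  rw [PySem.List.foldl_congr_mem ((PySem.List.dedup s).map (pvPosL s))
    (fun counts pos =>
      (PySem.List.enumerate pos 0).foldl
        (fun counts ap => pvInnerB ap.2 (PySem.List.slice pos (some (ap.1 + 1)) (some (ap.1 + 21))) counts)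
        counts)
    (fun counts pos => pvPairsB pos counts)
    (List.replicate 21 (0 : Int))
    (by
      intro acc pos hpos
      obtain ⟨c, _, rfl⟩ := List.mem_map.mp hpos
      have := mid_eq (pvPosL s c) [] acc (posL_pairwise s c)
      simpa using this)]
  -- histogram value = sum over characters of pair counts
  have hL : ∀ pos ∈ (PySem.List.dedup s).map (pvPosL s), pos.Pairwise (· ≤ ·) := by
    intro pos hpos
    obtain ⟨c, _, rfl⟩ := List.mem_map.mp hpos
    exact (posL_pairwise s c).imp (fun h => le_of_lt h)
  rw [outer_getD i h3 h20 _ hL _ (by simp)]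
  have hz : PySem.List.pyGetD (List.replicate 21 (0 : Int)) (i : Int) 0 = 0 := by
    rw [PySem.List.pyGetD_natCast, List.getD_eq_getElem?_getD, List.getElem?_replicate]
    split <;> rfl
  rw [hz]
  -- the sum over characters is the pair-coincidence count
  have hsum : (((PySem.List.dedup s).map (pvPosL s)).map (pvNP i)).sum
      = (List.range n).countP
          (fun j => decide (j + i < n ∧ s.getD j ' ' = s.getD (j + i) ' ')) := by
    rw [List.map_map]
    have hone : (pvNP i ∘ pvPosL s) = fun c =>
        (List.range n).countP
          (fun j => decide (j + i < n ∧ s.getD j ' ' = s.getD (j + i) ' ')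
            && decide (s.getD j ' ' = c)) := by
      funext c
      rw [Function.comp_apply, np_eq_countP i (by omega) _ (posL_pairwise s c), countP_posL]
    rw [hone]
    apply partition_countP (fun j => s.getD j ' ') _ _ (PySem.List.nodup_dedup s)
    intro j hj
    have hjn : j < n := List.mem_range.mp hj
    rw [PySem.List.mem_dedup]
    have : s.getD j ' ' = s[j]'(by omega) := by
      rw [List.getD_eq_getElem?_getD, List.getElem?_eq_getElem (by omega)]
      rfl
    rw [this]
    exact List.getElem_mem _
  -- the spaces fold is the pad-coincidence count
  have hsp : (pvPosL s ' ').foldl (fun t p => if p < (i : Int) then t + 1 else t) (0 : Int)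
      = ((List.range n).countP (fun j => decide (j < i) && decide (s.getD j ' ' = ' ')) : Int) := by
    rw [PySem.List.foldl_ite_add_one (fun p => p < (i : Int))]
    rw [pvPosL, List.countP_map, List.countP_filter]
    have hco := List.countP_congr (l := List.range n)
      (p := fun j => ((fun p : Int => decide (p < (i : Int))) ∘ (fun j : Nat => (j : Int))) j
            && decide (s.getD j ' ' = ' '))
      (q := fun j => decide (j < i) && decide (s.getD j ' ' = ' '))
      (by intro j _; simp [Nat.cast_lt])
    rw [hco]
    norm_num
  rw [hsum, hsp, coinc_split s i]
  push_cast
  ring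

lemma main_eq (ciphertext : String)
    (hp : ∃ i < 21, 3 ≤ i ∧ 20 * pvCoinc ciphertext.toList i > ciphertext.toList.length) :
    run_shifted_text_attack ciphertext = run_shifted_text_attack_alt ciphertext := by
  obtain ⟨k, t, hkeys, hA⟩ := A_reduced ciphertext hp
  unfold run_shifted_text_attack_alt
  dsimp only
  set s := ciphertext.toList with hs
  rw [dict_getD s ' ', pyRange_lit, List.foldl_map]
  rw [PySem.List.foldl_congr_mem (List.range' 3 18) _
    (fun g (i : Nat) => if 20 * pvCoinc s i > s.length then (Int.gcd g (i : Int) : Int) else g)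
    0 ?_]
  · rw [cond_fold (fun i => 20 * pvCoinc s i > s.length)
      (fun g (i : Nat) => (Int.gcd g (i : Int) : Int))]
    rw [hkeys, hA, List.foldl_cons]
    have : (Int.gcd 0 (k : Int) : Int) = (k : Int) := by
      simp [Int.gcd]
    rw [this]
  · intro acc x hx
    have hx' := List.mem_range'_1.mp hx
    have h3 : 3 ≤ x := hx'.1
    have h20 : x ≤ 20 := by omega
    show _ = if 20 * pvCoinc s x > s.length then (Int.gcd acc (x : Int) : Int) else acc
    rw [B_count_eq s x h3 h20]
    have hcond : (20 * ((pvCoinc s x : Nat) : Int) > ((s.length : Nat) : Int))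
        ↔ 20 * pvCoinc s x > s.length := by exact_mod_cast Iff.rfl
    by_cases hc : 20 * pvCoinc s x > s.length
    · rw [if_pos (hcond.mpr hc), if_pos hc]
    · rw [if_neg (fun h => hc (hcond.mp h)), if_neg hc]

-- ===== VERDICT (by name: the statement is the Claim_ definition above) =====
theorem run_shifted_text_attack_spec : Claim_equal_run_shifted_text_attack := by
  unfold Claim_equal_run_shifted_text_attack Pre_run_shifted_text_attack Spec_run_shifted_text_attack
  intro ciphertext _ hp
  exact main_eq ciphertext hp
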